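-- pv_equiv track=rewrite | github.com/steve-jang/Advent-of-Code | Day24/day24.py | setup_tiles
-- ===== SOURCE A (Python) =====
-- BLACK = 1
--
-- WHITE = 2
--
-- def setup_tiles(tile_positions):
--     tiles = {(0, 0): WHITE}
--
--     for tile_pos in tile_positions:
--         if tiles.get(tile_pos):
--             if tiles[tile_pos] == WHITE:
--                 tiles[tile_pos] = BLACK
--             else:
--                 tiles[tile_pos] = WHITE
--         else:
--             tiles[tile_pos] = BLACK
--
--     return tiles
-- ===== SOURCE B (Python) =====
-- BLACK = 1
--
-- WHITE = 2
--
-- def setup_tiles(tile_positions):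
--     counts = {(0, 0): 0}
--     for pos in tile_positions:
--         counts[pos] = counts.get(pos, 0) + 1
--     return {pos: BLACK if c % 2 else WHITE for pos, c in counts.items()}
-- ===== Notes on version B (the rewrite author's own statement) =====
-- stated objective: simpler
-- what changed: B replaces A's incremental WHITE/BLACK running-toggle with a count-then-classify decomposition: one pass builds a count table (seeded with (0,0):0), then a comprehension maps each position to BLACK iff its count is odd.
import Mathlib
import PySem

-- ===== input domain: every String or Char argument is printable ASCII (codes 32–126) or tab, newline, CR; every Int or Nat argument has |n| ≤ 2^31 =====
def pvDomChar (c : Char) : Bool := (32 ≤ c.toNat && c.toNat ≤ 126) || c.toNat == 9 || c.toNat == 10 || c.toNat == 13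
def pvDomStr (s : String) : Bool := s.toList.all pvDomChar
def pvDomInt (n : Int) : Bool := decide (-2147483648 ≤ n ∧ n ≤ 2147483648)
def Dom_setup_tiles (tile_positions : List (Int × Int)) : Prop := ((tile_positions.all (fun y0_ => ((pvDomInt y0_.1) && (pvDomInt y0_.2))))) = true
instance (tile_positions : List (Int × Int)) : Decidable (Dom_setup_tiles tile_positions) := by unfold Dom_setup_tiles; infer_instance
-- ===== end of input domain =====

-- B replaces A's running WHITE/BLACK toggle with a count table followed by a parity classification pass.

-- flatten a ((k1,k2),v) items list into (k1,k2,v) triples (the return-type convention)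
def pvFlatten (items : List ((Int × Int) × Int)) : List (Int × Int × Int) :=
  items.map (fun p => (p.1.1, p.1.2, p.2))

-- ===== PORT A =====
def setup_tiles (tile_positions : List (Int × Int)) : List (Int × Int × Int) :=
  let tiles :=
    tile_positions.foldl
      (fun (tiles : PySem.Dict (Int × Int) Int) tile_pos =>
        match tiles.get? tile_pos with
        | some v => if v = 2 then tiles.insert tile_pos 1 else tiles.insert tile_pos 2
        | none => tiles.insert tile_pos 1)
      ((PySem.Dict.empty).insert (0, 0) 2)
  pvFlatten tiles.items

-- ===== PORT B =====
def pvClassify (c : Int) : Int := if PySem.Int.mod c 2 ≠ 0 then 1 else 2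

def setup_tiles_alt (tile_positions : List (Int × Int)) : List (Int × Int × Int) :=
  let counts :=
    tile_positions.foldl
      (fun (d : PySem.Dict (Int × Int) Int) pos => d.insert pos (d.getD pos 0 + 1))
      ((PySem.Dict.empty).insert (0, 0) 0)
  pvFlatten (counts.items.map (fun p => (p.1, pvClassify p.2)))

-- ===== PRECONDITION & SPEC =====
def Spec_setup_tiles (tile_positions : List (Int × Int)) (out : List (Int × Int × Int)) : Prop := out = setup_tiles_alt tile_positions
instance (tile_positions : List (Int × Int)) (out : List (Int × Int × Int)) : Decidable (Spec_setup_tiles tile_positions out) := by unfold Spec_setup_tiles; infer_instance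

-- ===== CLAIM (what is proved, stated in full; the proofs are below) =====
def Claim_equal_setup_tiles : Prop := ∀ (tile_positions : List (Int × Int)), Dom_setup_tiles tile_positions → Spec_setup_tiles tile_positions (setup_tiles tile_positions)

-- ===== LEMMAS AND PROOFS =====

-- B's count dict viewed through the parity classification
def pvMapD (d : PySem.Dict (Int × Int) Int) : PySem.Dict (Int × Int) Int :=
  PySem.Dict.mk (d.items.map (fun p => (p.1, pvClassify p.2)))

lemma pvMod2 (n : Int) : PySem.Int.mod n 2 = n % 2 :=
  PySem.Int.mod_eq_emod_of_pos (by norm_num)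

lemma pvClassify_succ (n : Int) :
    pvClassify (n + 1) = if pvClassify n = 2 then 1 else 2 := by
  unfold pvClassify
  rw [pvMod2, pvMod2]
  rcases Int.emod_two_eq n with h | h <;> simp [h] <;> omega

lemma pvMapD_get? (d : PySem.Dict (Int × Int) Int) (k : Int × Int) :
    (pvMapD d).get? k = (d.get? k).map pvClassify := by
  obtain ⟨l⟩ := d
  induction l with
  | nil => simp [pvMapD, PySem.Dict.get?]
  | cons p rest ih =>
    simp only [pvMapD, List.map_cons] at *
    rw [PySem.Dict.get?_mk_cons, PySem.Dict.get?_mk_cons]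
    by_cases h : p.1 == k <;> simp [h, ih]

lemma pvMapD_insert (d : PySem.Dict (Int × Int) Int) (k : Int × Int) (n : Int) :
    (pvMapD d).insert k (pvClassify n) = pvMapD (d.insert k n) := by
  have hkeys : (pvMapD d).keys = d.keys := by
    simp [pvMapD, PySem.Dict.keys, Function.comp]
  have hcont : (pvMapD d).contains k = d.contains k := by
    rw [PySem.Dict.contains_eq_decide_mem_keys, PySem.Dict.contains_eq_decide_mem_keys, hkeys]
  apply PySem.Dict.ext
  rw [PySem.Dict.items_insert, hcont]
  by_cases h : d.contains k
  · simp only [if_true, pvMapD, PySem.Dict.items_insert, h, List.map_map]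
    apply List.map_congr_left
    intro p _
    by_cases hp : p.1 == k <;> simp [hp, Function.comp]
  · simp [pvMapD, PySem.Dict.items_insert, h]

lemma pv_step (l : List (Int × Int)) (d : PySem.Dict (Int × Int) Int) :
    l.foldl
      (fun (tiles : PySem.Dict (Int × Int) Int) tile_pos =>
        match tiles.get? tile_pos with
        | some v => if v = 2 then tiles.insert tile_pos 1 else tiles.insert tile_pos 2
        | none => tiles.insert tile_pos 1)
      (pvMapD d)
    = pvMapD (l.foldl (fun d pos => d.insert pos (d.getD pos 0 + 1)) d) := by
  induction l generalizing d with
  | nil => rfl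
  | cons pos rest ih =>
    simp only [List.foldl_cons]
    rw [← ih]
    congr 1
    rw [pvMapD_get?]
    cases hg : d.get? pos with
    | none =>
      have hgd : d.getD pos 0 = 0 := PySem.Dict.getD_of_get?_eq_none d 0 hg
      have h1 : pvClassify (d.getD pos 0 + 1) = 1 := by
        rw [hgd]; unfold pvClassify; rw [pvMod2]; norm_num
      simp only [Option.map_none]
      conv_lhs => rw [← h1]
      rw [pvMapD_insert]
    | some n =>
      have hgd : d.getD pos 0 = n := PySem.Dict.getD_of_get?_eq_some d 0 hg
      simp only [Option.map_some]
      rw [hgd, ← pvMapD_insert, pvClassify_succ]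
      by_cases h2 : pvClassify n = 2 <;> simp [h2]

-- ===== VERDICT (by name: the statement is the Claim_ definition above) =====
theorem setup_tiles_spec : Claim_equal_setup_tiles := by
  intro tps _
  unfold Spec_setup_tiles setup_tiles setup_tiles_alt
  have h0 : ((PySem.Dict.empty : PySem.Dict (Int × Int) Int).insert (0, 0) 2)
      = pvMapD ((PySem.Dict.empty).insert (0, 0) 0) := by
    apply PySem.Dict.ext
    simp [pvMapD, PySem.Dict.items_insert, PySem.Dict.empty, pvClassify]
  rw [h0, pv_step]
  simp [pvMapD, pvFlatten, List.map_map]
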